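-- pv_equiv track=rewrite | github.com/DEMON1A/VCS | utils/nameFinder.py | nameStringFinder
-- ===== SOURCE A (Python) =====
-- def nameStringFinder(reGexResults):
--     for singleCharacter in reGexResults:
--         if singleCharacter != "(":
--             reGexResults = reGexResults[1:]
--         else:
--             break
--
--     nameString = reGexResults.replace('(' , '').replace(')' , '')
--     return nameString
-- ===== SOURCE B (Python) =====
-- def nameStringFinder(reGexResults):
--     # Single stateful pass: a 'seen_open' flag replaces A's strip-prefix
--     # phase and the two replace() passes.
--     seen_open = False
--     acc = []
--     for ch in reGexResults:
--         if not seen_open: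
--             if ch == "(":
--                 seen_open = True
--         elif ch != "(" and ch != ")":
--             acc.append(ch)
--     return "".join(acc)
-- ===== Notes on version B (the rewrite author's own statement) =====
-- stated objective: faster
-- what changed: Replaces A's three passes (char-by-char prefix re-slicing, then two full replace() scans) by one linear scan with a seen_open flag and an accumulator.
import Mathlib
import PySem

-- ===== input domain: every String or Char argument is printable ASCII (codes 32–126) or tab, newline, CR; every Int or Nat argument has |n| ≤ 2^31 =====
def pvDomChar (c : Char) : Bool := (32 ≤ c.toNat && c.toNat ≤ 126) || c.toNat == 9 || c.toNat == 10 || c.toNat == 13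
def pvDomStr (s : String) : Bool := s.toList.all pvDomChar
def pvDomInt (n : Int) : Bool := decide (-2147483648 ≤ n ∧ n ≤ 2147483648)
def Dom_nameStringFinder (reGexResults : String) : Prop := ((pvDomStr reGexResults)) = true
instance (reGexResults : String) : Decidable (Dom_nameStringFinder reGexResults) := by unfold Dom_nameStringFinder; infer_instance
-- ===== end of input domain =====

-- B replaces A's three passes (prefix re-slicing loop, then two replace() scans)
-- by one linear scan with a seen_open flag and an accumulator; return value proved equal.

-- ===== PORT A =====
-- A's for-loop iterates over the ORIGINAL string's characters while re-slicing the
-- variable: state = current (re-sliced) char list, scanned list = original chars.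
def pvAStrip : List Char → List Char → List Char
  | [], s => s
  | c :: cs, s => if c ≠ '(' then pvAStrip cs (PySem.List.slice s (some 1) none) else s

def nameStringFinder (reGexResults : String) : String :=
  let r := pvAStrip reGexResults.toList reGexResults.toList
  PySem.Str.replace (PySem.Str.replace (String.ofList r) "(" "") ")" ""

-- ===== PORT B =====
-- Source B's loop: state = (seen_open flag, accumulator list); acc.append ported as
-- cons onto a reversed accumulator, reversed at the join.
def pvBLoop : List Char → Bool → List Char → List Char
  | [], _, acc => acc.reverse
  | c :: cs, seen, acc =>
    if seen = false then
      if c = '(' then pvBLoop cs true acc else pvBLoop cs false acc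
    else
      if c ≠ '(' ∧ c ≠ ')' then pvBLoop cs seen (c :: acc) else pvBLoop cs seen acc

def nameStringFinder_alt (reGexResults : String) : String :=
  String.ofList (pvBLoop reGexResults.toList false [])

-- ===== PRECONDITION & SPEC =====
def Spec_nameStringFinder (reGexResults : String) (out : String) : Prop := out = nameStringFinder_alt reGexResults
instance (reGexResults : String) (out : String) : Decidable (Spec_nameStringFinder reGexResults out) := by unfold Spec_nameStringFinder; infer_instance

-- ===== CLAIM (what is proved, stated in full; the proofs are below) =====
def Claim_equal_nameStringFinder : Prop := ∀ (reGexResults : String), Dom_nameStringFinder reGexResults → Spec_nameStringFinder reGexResults (nameStringFinder reGexResults)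

-- ===== LEMMAS AND PROOFS =====

-- A's strip loop, started with the scanned list equal to the state, drops the prefix
-- before the first '('.
theorem pvAStrip_eq_dropWhile (l : List Char) :
    pvAStrip l l = l.dropWhile (fun c => c != '(') := by
  induction l with
  | nil => rfl
  | cons c cs ih =>
    by_cases h : c = '('
    · subst h; simp [pvAStrip, List.dropWhile]
    · have hb : (c != '(') = true := by simp [h]
      simp [pvAStrip, List.dropWhile, hb, h, PySem.List.slice, ih]

-- single-char replace-by-empty is a filter (enough fuel)
theorem replace_go_filter (ch : Char) (l : List Char) (fuel : Nat) (acc : List Char)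
    (h : l.length ≤ fuel) :
    PySem.Chars.replace.go [ch] [] fuel l acc = acc.reverse ++ l.filter (fun c => c != ch) := by
  induction l generalizing fuel acc with
  | nil => cases fuel <;> simp [PySem.Chars.replace.go]
  | cons c cs ih =>
    cases fuel with
    | zero => simp at h
    | succ f =>
      simp only [List.length_cons, Nat.succ_le_succ_iff] at h
      by_cases hc : ch = c
      · subst hc
        simp [PySem.Chars.replace.go, List.isPrefixOf, ih _ _ h, List.filter]
      · have hb : (c != ch) = true := by simp [Ne.symm hc]
        simp [PySem.Chars.replace.go, List.isPrefixOf, hc, ih _ _ h, List.filter, hb]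

theorem replace_filter (ch : Char) (l : List Char) :
    PySem.Chars.replace l [ch] [] = l.filter (fun c => c != ch) := by
  simpa [PySem.Chars.replace] using replace_go_filter ch l l.length [] le_rfl

-- B's loop once '(' has been seen: append-filter of the rest
theorem pvBLoop_true (l : List Char) (acc : List Char) :
    pvBLoop l true acc = acc.reverse ++ l.filter (fun c => decide (c ≠ '(' ∧ c ≠ ')')) := by
  induction l generalizing acc with
  | nil => simp [pvBLoop]
  | cons c cs ih =>
    by_cases h : c ≠ '(' ∧ c ≠ ')'
    · simp [pvBLoop, h, ih, List.filter]
    · simp [pvBLoop, h, ih, List.filter]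

-- B's loop before '(' is seen: nothing is emitted until the first '('
theorem pvBLoop_false (l : List Char) :
    pvBLoop l false [] =
      (l.dropWhile (fun c => c != '(')).filter (fun c => decide (c ≠ '(' ∧ c ≠ ')')) := by
  induction l with
  | nil => rfl
  | cons c cs ih =>
    by_cases h : c = '('
    · subst h
      simp [pvBLoop, pvBLoop_true, List.dropWhile]
    · have hb : (c != '(') = true := by simp [h]
      simp [pvBLoop, h, List.dropWhile, hb, ih]

-- ===== VERDICT (by name: the statement is the Claim_ definition above) =====
theorem nameStringFinder_spec : Claim_equal_nameStringFinder := by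
  intro s _
  unfold Spec_nameStringFinder nameStringFinder nameStringFinder_alt
  simp only [PySem.Str.replace, String.toList_ofList, pvAStrip_eq_dropWhile,
    pvBLoop_false]
  congr 1
  rw [show ("(" : String).toList = ['('] from rfl, show (")" : String).toList = [')'] from rfl,
    show ("" : String).toList = [] from rfl]
  rw [replace_filter, replace_filter, List.filter_filter]
  apply List.filter_congr
  intro c _
  by_cases h1 : c = '(' <;> by_cases h2 : c = ')' <;> simp [h1, h2]
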